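-- pv_equiv track=rewrite | github.com/shhuan1989/algorithms | codeforces/1065C.py | findNextHighest
-- ===== SOURCE A (Python) =====
-- def canSliceToHeight(highest, targetHeight, start, heights, maxSlicedHeight):
--     """
--     判断能否横向切一刀之后所有建筑的高度都低于targetHeight
--     :param highest: 当前最高建筑的高度
--     :param targetHeight: 目标高度
--     :param start: start左边的建筑的高度都是highest
--     :param heights: 所有建筑的高度，降序排列
--     :param maxSlicedHeight: 横向切一刀之后，建筑被切掉的高度的和不能超过maxSlicedHeight
--     :return:
--     """
--     total = (highest - targetHeight) * start
--     if total > maxSlicedHeight: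
--         return False
--
--     for i in range(start, len(heights)):
--         h = heights[i]
--         if h <= targetHeight:
--             break
--         total += heights[i] - targetHeight
--
--     return total <= maxSlicedHeight
--
-- def findNextHighest(currentHighest, start, heights, maxSlicedHeight):
--     """
--     采用二分查找，横向切一刀之后最高建筑的最低高度
--     :param currentHighest: 当前所有建筑的最高高度
--     :param start: start左边的建筑的高度都等于currentHighest
--     :param heights: 所有建筑的高度
--     :param maxSlicedHeight: 横向切一刀之后，建筑被切掉的高度的和不能超过maxSlicedHeight
--     :return:
--     """
--
--     lo, hi = 0, currentHighest
--
--     while lo < hi: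
--         m = (lo + hi) // 2
--         if canSliceToHeight(currentHighest, m, start, heights, maxSlicedHeight):
--             hi = m
--         else:
--             lo = m + 1
--
--
--     return lo
-- ===== SOURCE B (Python) =====
-- def findNextHighest(currentHighest, start, heights, maxSlicedHeight):
--     # Prefix sums + running minima over heights[start:]: each feasibility
--     # check locates the slice boundary by bisect and reads the cost off
--     # the prefix sums, instead of rescanning the list.
--     tail = heights[start:]
--     n = len(tail)
--     pre = [0]
--     acc = 0
--     for h in tail:
--         acc += h
--         pre.append(acc)
--     rmin = [0]
--     cur = None
--     for h in tail:
--         cur = h if cur is None else min(cur, h)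
--         rmin.append(cur)
--
--     def ok(m):
--         # j = length of the maximal prefix of tail whose elements all exceed m
--         lo, hi = 0, n
--         while lo < hi:
--             mid = (lo + hi) // 2
--             if rmin[mid + 1] <= m:
--                 hi = mid
--             else:
--                 lo = mid + 1
--         j = lo
--         total = (currentHighest - m) * start + pre[j] - m * j
--         return total <= maxSlicedHeight
--
--     lo, hi = 0, currentHighest
--     while lo < hi:
--         m = (lo + hi) // 2
--         if ok(m):
--             hi = m
--         else:
--             lo = m + 1
--     return lo
-- ===== Notes on version B (the rewrite author's own statement) =====
-- stated objective: alternative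
-- what changed: B precomputes prefix sums and running minima of heights[start:] once, then each feasibility check of the outer binary search locates the slice boundary by a bisect on the running-minimum array and reads the sliced mass off the prefix sums, instead of A's per-check linear rescan with early exit; A's early exits make it equally fast in practice, so this is an alternative algorithm, not a speed-up.
-- outside the precondition, e.g. on findNextHighest(5, -1, [5, 2], 3): A returns 1, B returns 0
import Mathlib
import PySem

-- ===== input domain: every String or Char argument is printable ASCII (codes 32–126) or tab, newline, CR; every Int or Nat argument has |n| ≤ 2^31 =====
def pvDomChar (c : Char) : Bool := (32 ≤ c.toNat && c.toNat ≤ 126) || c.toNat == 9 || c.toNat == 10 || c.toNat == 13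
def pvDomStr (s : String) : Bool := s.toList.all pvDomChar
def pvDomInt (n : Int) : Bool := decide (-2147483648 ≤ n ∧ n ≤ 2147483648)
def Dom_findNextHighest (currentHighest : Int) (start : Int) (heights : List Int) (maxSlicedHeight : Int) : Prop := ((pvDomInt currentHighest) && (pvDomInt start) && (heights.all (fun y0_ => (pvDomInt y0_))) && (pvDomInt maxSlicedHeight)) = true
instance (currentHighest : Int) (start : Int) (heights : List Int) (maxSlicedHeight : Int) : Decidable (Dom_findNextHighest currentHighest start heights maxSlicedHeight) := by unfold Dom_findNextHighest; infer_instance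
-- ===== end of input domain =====

-- B replaces A's rescan inside every binary-search check by precomputed prefix sums
-- plus a bisect on running minima (objective: alternative algorithm, same cost).

-- ===== PORT A =====
-- the for-loop of canSliceToHeight (i runs over range(start, len(heights)); break on h <= targetHeight)
def canSliceLoop (heights : List Int) (targetHeight : Int) (i : Int) (total : Int) : Int :=
  if _h : i < (heights.length : Int) then
    match PySem.List.pyGet? heights i with
    | none => total      -- IndexError in Python; unreachable for 0 ≤ i (Pre_)
    | some x =>
      if x ≤ targetHeight then total
      else canSliceLoop heights targetHeight (i + 1) (total + (x - targetHeight))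
  else total
termination_by ((heights.length : Int) - i).toNat
decreasing_by omega

def canSliceToHeight (highest : Int) (targetHeight : Int) (start : Int) (heights : List Int) (maxSlicedHeight : Int) : Bool :=
  let total := (highest - targetHeight) * start
  if total > maxSlicedHeight then false
  else decide (canSliceLoop heights targetHeight start total ≤ maxSlicedHeight)

-- the while lo < hi loop of findNextHighest
def fnhLoop (currentHighest : Int) (start : Int) (heights : List Int) (maxSlicedHeight : Int) (lo hi : Int) : Int :=
  if _h : lo < hi then
    let m := PySem.Int.floordiv (lo + hi) 2
    if canSliceToHeight currentHighest m start heights maxSlicedHeight then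
      fnhLoop currentHighest start heights maxSlicedHeight lo m
    else
      fnhLoop currentHighest start heights maxSlicedHeight (m + 1) hi
  else lo
termination_by (hi - lo).toNat
decreasing_by
  all_goals
    have := PySem.Int.floordiv_eq_ediv_of_pos (a := lo + hi) (b := 2) (by omega)
    omega

def findNextHighest (currentHighest : Int) (start : Int) (heights : List Int) (maxSlicedHeight : Int) : Int :=
  fnhLoop currentHighest start heights maxSlicedHeight 0 currentHighest

-- ===== PORT B =====
-- the prefix-sum loop of Source B (pre = [0]; acc += h; pre.append(acc))
def prefixesB (acc : Int) : List Int → List Int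
  | [] => []
  | h :: t => (acc + h) :: prefixesB (acc + h) t

-- cur = h if cur is None else min(cur, h)
def mstepB (cur : Option Int) (h : Int) : Int :=
  match cur with
  | none => h
  | some c => min c h

-- the running-minimum loop of Source B (rmin = [0]; rmin.append(cur))
def rminsB (cur : Option Int) : List Int → List Int
  | [] => []
  | h :: t => mstepB cur h :: rminsB (some (mstepB cur h)) t

-- the inner while lo < hi bisect of ok(m); rmin[mid+1] is always in range here,
-- so pyGetD with default 0 is exact
def okLoopB (rmin : List Int) (m : Int) (lo hi : Int) : Int :=
  if _h : lo < hi then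
    let mid := PySem.Int.floordiv (lo + hi) 2
    if PySem.List.pyGetD rmin (mid + 1) 0 ≤ m then okLoopB rmin m lo mid
    else okLoopB rmin m (mid + 1) hi
  else lo
termination_by (hi - lo).toNat
decreasing_by
  all_goals
    have := PySem.Int.floordiv_eq_ediv_of_pos (a := lo + hi) (b := 2) (by omega)
    omega

-- ok(m) of Source B
def okB (currentHighest start maxSlicedHeight : Int) (pre rmin : List Int) (n : Int) (m : Int) : Bool :=
  let j := okLoopB rmin m 0 n
  decide ((currentHighest - m) * start + PySem.List.pyGetD pre j 0 - m * j ≤ maxSlicedHeight)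

-- the outer while lo < hi loop of Source B
def altLoop (currentHighest start maxSlicedHeight : Int) (pre rmin : List Int) (n : Int) (lo hi : Int) : Int :=
  if _h : lo < hi then
    let m := PySem.Int.floordiv (lo + hi) 2
    if okB currentHighest start maxSlicedHeight pre rmin n m then
      altLoop currentHighest start maxSlicedHeight pre rmin n lo m
    else
      altLoop currentHighest start maxSlicedHeight pre rmin n (m + 1) hi
  else lo
termination_by (hi - lo).toNat
decreasing_by
  all_goals
    have := PySem.Int.floordiv_eq_ediv_of_pos (a := lo + hi) (b := 2) (by omega)
    omega

def findNextHighest_alt (currentHighest : Int) (start : Int) (heights : List Int) (maxSlicedHeight : Int) : Int :=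
  let tail := PySem.List.slice heights (some start) none
  let n : Int := tail.length
  let pre := 0 :: prefixesB 0 tail
  let rmin := 0 :: rminsB none tail
  altLoop currentHighest start maxSlicedHeight pre rmin n 0 currentHighest

-- ===== PRECONDITION & SPEC =====
-- Pre_ excludes negative start, where 'start' (a count of buildings) is outside the
-- function's natural domain: Python A then either raises IndexError (start < -len)
-- or silently reads heights via negative-index wraparound, an artefact of A's
-- implementation; B does the natural thing there.
def Pre_findNextHighest (currentHighest : Int) (start : Int) (heights : List Int) (maxSlicedHeight : Int) : Prop :=
  0 ≤ start
instance (currentHighest : Int) (start : Int) (heights : List Int) (maxSlicedHeight : Int) : Decidable (Pre_findNextHighest currentHighest start heights maxSlicedHeight) := by unfold Pre_findNextHighest; infer_instance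

def pvWitness_findNextHighest : Int × Int × List Int × Int := (10, 1, [10, 7, 3], 5)

def Spec_findNextHighest (currentHighest : Int) (start : Int) (heights : List Int) (maxSlicedHeight : Int) (out : Int) : Prop := out = findNextHighest_alt currentHighest start heights maxSlicedHeight
instance (currentHighest : Int) (start : Int) (heights : List Int) (maxSlicedHeight : Int) (out : Int) : Decidable (Spec_findNextHighest currentHighest start heights maxSlicedHeight out) := by unfold Spec_findNextHighest; infer_instance

-- ===== CLAIM (what is proved, stated in full; the proofs are below) =====
def Claim_equal_findNextHighest : Prop := ∀ (currentHighest : Int) (start : Int) (heights : List Int) (maxSlicedHeight : Int), Dom_findNextHighest currentHighest start heights maxSlicedHeight → Pre_findNextHighest currentHighest start heights maxSlicedHeight → Spec_findNextHighest currentHighest start heights maxSlicedHeight (findNextHighest currentHighest start heights maxSlicedHeight)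

-- ===== LEMMAS AND PROOFS =====

-- the per-check predicate the two programs share: out of heights[start:], the prefix
-- of buildings still strictly above m is sliced; pA below is that prefix's predicate
def pA (m x : Int) : Bool := !decide (x ≤ m)

-- A's scan, abstracted over the dropped prefix
def scanT (m : Int) : List Int → Int → Int
  | [], total => total
  | h :: r, total => if h ≤ m then total else scanT m r (total + (h - m))

-- B's running-minimum fold (what rminsB tabulates)
def gfold (c : Option Int) (l : List Int) : Option Int :=
  l.foldl (fun a h => some (mstepB a h)) c

lemma canSliceLoop_eq_scanT (m : Int) (l : List Int) (i total : Int) (h0 : 0 ≤ i) :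
    canSliceLoop l m i total = scanT m (l.drop i.toNat) total := by
  fun_induction canSliceLoop l m i total
  case case1 =>
    rename_i i total hlt hnone
    rw [PySem.List.pyGet?_eq_some_getElem (xs := l) h0 hlt] at hnone
    exact absurd hnone (by simp)
  case case2 =>
    rename_i i total hlt x hsome hle
    have hi : i.toNat < l.length := by omega
    rw [PySem.List.pyGet?_eq_some_getElem (xs := l) h0 hlt] at hsome
    rw [List.drop_eq_getElem_cons hi]
    simp only [scanT]
    rw [if_pos (by injection hsome with h; exact h ▸ hle)]
  case case3 =>
    rename_i i total hlt x hsome hgt ih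
    have hi : i.toNat < l.length := by omega
    rw [PySem.List.pyGet?_eq_some_getElem (xs := l) h0 hlt] at hsome
    injection hsome with hx
    subst hx
    rw [List.drop_eq_getElem_cons hi]
    simp only [scanT, if_neg hgt]
    have := ih (by omega)
    rwa [show (i + 1).toNat = i.toNat + 1 by omega] at this
  case case4 =>
    rename_i i total hge
    rw [List.drop_eq_nil_of_le (by omega)]
    simp [scanT]

lemma scanT_closed (m : Int) :
    ∀ (l : List Int) (total : Int),
      scanT m l total = total + (l.takeWhile (pA m)).sum - m * (l.takeWhile (pA m)).length := by
  intro l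
  induction l with
  | nil => intro total; simp [scanT]
  | cons h r ih =>
    intro total
    by_cases hc : h ≤ m
    · simp [scanT, hc, pA]
    · simp only [scanT, if_neg hc, ih, List.takeWhile_cons, pA,
        show (!decide (h ≤ m)) = true by simp [hc]]
      push_cast [List.sum_cons, List.length_cons]
      ring

lemma scanT_ge (m : Int) : ∀ (l : List Int) (total : Int), total ≤ scanT m l total := by
  intro l
  induction l with
  | nil => intro total; simp [scanT]
  | cons h r ih =>
    intro total
    by_cases hc : h ≤ m
    · simp [scanT, hc]
    · calc total ≤ total + (h - m) := by omega
        _ ≤ scanT m r (total + (h - m)) := ih _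
        _ = scanT m (h :: r) total := by simp [scanT, hc]

-- A's check in closed form
lemma canSlice_closed (H m start : Int) (hs : List Int) (mx : Int) (hstart : 0 ≤ start) :
    canSliceToHeight H m start hs mx =
      decide ((H - m) * start + ((hs.drop start.toNat).takeWhile (pA m)).sum
        - m * ((hs.drop start.toNat).takeWhile (pA m)).length ≤ mx) := by
  unfold canSliceToHeight
  by_cases hearly : (H - m) * start > mx
  · rw [if_pos hearly]
    have h2 := scanT_ge m (hs.drop start.toNat) ((H - m) * start)
    rw [scanT_closed] at h2
    symm
    simp only [decide_eq_false_iff_not]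
    omega
  · rw [if_neg hearly, canSliceLoop_eq_scanT m hs start _ hstart, scanT_closed]

lemma rmins_getD :
    ∀ (t : List Int) (c : Option Int) (j : Nat), j < t.length →
      some ((rminsB c t).getD j 0) = gfold c (t.take (j + 1)) := by
  intro t
  induction t with
  | nil => intro c j hj; simp at hj
  | cons h r ih =>
    intro c j hj
    cases j with
    | zero => simp [rminsB, gfold]
    | succ j =>
      have := ih (some (mstepB c h)) j (by simpa using hj)
      simpa [rminsB, gfold, List.take_succ_cons] using this

lemma gfold_le : ∀ (l : List Int) (a v : Int), gfold (some a) l = some v →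
    v ≤ a ∧ ∀ x ∈ l, v ≤ x := by
  intro l
  induction l with
  | nil => intro a v h; simp [gfold] at h; simp [h]
  | cons h r ih =>
    intro a v hg
    simp only [gfold, List.foldl_cons, mstepB] at hg
    obtain ⟨h1, h2⟩ := ih (min a h) v hg
    refine ⟨by omega, ?_⟩
    intro x hx
    rcases List.mem_cons.mp hx with rfl | hx
    · omega
    · exact h2 x hx

lemma gfold_none_le (l : List Int) (v : Int) (h : gfold none l = some v) :
    ∀ x ∈ l, v ≤ x := by
  cases l with
  | nil => simp [gfold] at h
  | cons hd r =>
    simp only [gfold, List.foldl_cons, mstepB] at h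
    obtain ⟨h1, h2⟩ := gfold_le r hd v h
    intro x hx
    rcases List.mem_cons.mp hx with rfl | hx
    · exact h1
    · exact h2 x hx

lemma gfold_gt (m : Int) : ∀ (l : List Int) (c : Option Int) (v : Int), gfold c l = some v →
    (∀ x ∈ l, m < x) → (∀ a, c = some a → m < a) → m < v := by
  intro l
  induction l with
  | nil =>
    intro c v hg _ hc
    cases c with
    | none => simp [gfold] at hg
    | some a => simp [gfold] at hg; exact hg ▸ hc a rfl
  | cons h r ih =>
    intro c v hg hall hc
    simp only [gfold, List.foldl_cons] at hg
    refine ih (some (mstepB c h)) v hg (fun x hx => hall x (List.mem_cons_of_mem _ hx)) ?_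
    intro a ha
    have hh : m < h := hall h List.mem_cons_self
    cases c with
    | none => simp [mstepB] at ha; omega
    | some c0 =>
      have := hc c0 rfl
      simp [mstepB] at ha
      omega

lemma takeWhile_boundary (p : Int → Bool) :
    ∀ (l : List Int) (h : (l.takeWhile p).length < l.length),
      p (l[(l.takeWhile p).length]'h) = false := by
  intro l
  induction l with
  | nil => intro h; simp at h
  | cons hd r ih =>
    intro h
    by_cases hp : p hd
    · simpa [List.takeWhile_cons, hp] using ih (by simpa [List.takeWhile_cons, hp] using h)
    · simpa [List.takeWhile_cons, hp] using hp

-- the bisect predicate decides the boundary: rmin[mid+1] ≤ m  ↔  j* ≤ mid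
lemma rmin_iff (m : Int) (t : List Int) (mid : Nat) (hmid : mid < t.length) :
    ((rminsB none t).getD mid 0 ≤ m) ↔ (t.takeWhile (pA m)).length ≤ mid := by
  have hg := rmins_getD t none mid hmid
  constructor
  · intro hle
    by_contra hlt
    push_neg at hlt
    have hall : ∀ x ∈ t.take (mid + 1), m < x := by
      intro x hx
      have htw : t.takeWhile (pA m) = t.take (t.takeWhile (pA m)).length :=
        List.prefix_iff_eq_take.mp (List.takeWhile_prefix _)
      have hsub : t.take (mid + 1) = (t.takeWhile (pA m)).take (mid + 1) := by
        rw [htw, List.take_take, Nat.min_eq_left (by omega)]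
      rw [hsub] at hx
      have := List.mem_takeWhile_imp (List.mem_of_mem_take hx)
      simpa [pA] using this
    have := gfold_gt m (t.take (mid + 1)) none _ hg.symm hall (by simp)
    omega
  · intro hj
    have hjlen : (t.takeWhile (pA m)).length < t.length := lt_of_le_of_lt hj hmid
    have hb := takeWhile_boundary (pA m) t hjlen
    simp only [pA, Bool.not_eq_false', decide_eq_true_eq] at hb
    have hmem : t[(t.takeWhile (pA m)).length] ∈ t.take (mid + 1) := by
      have hlt' : (t.takeWhile (pA m)).length < mid + 1 := by omega
      have : (t.take (mid + 1))[(t.takeWhile (pA m)).length]'(by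
          simp [List.length_take]; omega) = t[(t.takeWhile (pA m)).length] := by
        simp [List.getElem_take]
      rw [← this]
      exact List.getElem_mem _
    have := gfold_none_le _ _ hg.symm _ hmem
    omega

lemma okLoopB_eq (m : Int) (t : List Int) (lo hi : Int) (h0 : 0 ≤ lo)
    (h1 : lo ≤ ((t.takeWhile (pA m)).length : Int))
    (h2 : ((t.takeWhile (pA m)).length : Int) ≤ hi) (h3 : hi ≤ (t.length : Int)) :
    okLoopB (0 :: rminsB none t) m lo hi = ((t.takeWhile (pA m)).length : Int) := by
  fun_induction okLoopB (0 :: rminsB none t) m lo hi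
  case case1 =>
    rename_i lo hi hlt mid hcond ih
    have hfd := PySem.Int.floordiv_eq_ediv_of_pos (a := lo + hi) (b := 2) (by omega)
    have hmid : mid = (lo + hi) / 2 := hfd
    have hb1 : lo ≤ mid := by omega
    have hb2 : mid < hi := by omega
    have hmn : mid.toNat < t.length := by omega
    rw [PySem.List.pyGetD_of_nonneg _ 0 (by omega : (0:Int) ≤ mid + 1),
      show (mid + 1).toNat = mid.toNat + 1 by omega, List.getD_cons_succ] at hcond
    have hj : (t.takeWhile (pA m)).length ≤ mid.toNat := (rmin_iff m t mid.toNat hmn).mp hcond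
    exact ih h0 h1 (by omega) (by omega)
  case case2 =>
    rename_i lo hi hlt mid hcond ih
    have hfd := PySem.Int.floordiv_eq_ediv_of_pos (a := lo + hi) (b := 2) (by omega)
    have hmid : mid = (lo + hi) / 2 := hfd
    have hb1 : lo ≤ mid := by omega
    have hb2 : mid < hi := by omega
    have hmn : mid.toNat < t.length := by omega
    rw [PySem.List.pyGetD_of_nonneg _ 0 (by omega : (0:Int) ≤ mid + 1),
      show (mid + 1).toNat = mid.toNat + 1 by omega, List.getD_cons_succ] at hcond
    have hj : ¬ (t.takeWhile (pA m)).length ≤ mid.toNat :=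
      fun h => hcond ((rmin_iff m t mid.toNat hmn).mpr h)
    exact ih (by omega) (by omega) h2 h3
  case case3 =>
    rename_i lo hi hge
    omega

lemma pre_getD : ∀ (t : List Int) (acc : Int) (j : Nat), j ≤ t.length →
    (acc :: prefixesB acc t).getD j 0 = acc + (t.take j).sum := by
  intro t
  induction t with
  | nil =>
    intro acc j hj
    simp only [List.length_nil, Nat.le_zero] at hj
    subst hj
    simp
  | cons h r ih =>
    intro acc j hj
    cases j with
    | zero => simp
    | succ j =>
      have h1 := ih (acc + h) j (by simpa using hj)
      simp only [prefixesB, List.getD_cons_succ, List.take_succ_cons, List.sum_cons] at *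
      omega

-- B's check equals A's check, pointwise in m
lemma okB_eq_canSlice (H start mx : Int) (hs : List Int) (m : Int) (hstart : 0 ≤ start) :
    okB H start mx (0 :: prefixesB 0 (hs.drop start.toNat))
        (0 :: rminsB none (hs.drop start.toNat)) ((hs.drop start.toNat).length : Int) m =
      canSliceToHeight H m start hs mx := by
  have hlen : ((hs.drop start.toNat).takeWhile (pA m)).length ≤ (hs.drop start.toNat).length :=
    (List.takeWhile_prefix _).length_le
  unfold okB
  simp only [okLoopB_eq m (hs.drop start.toNat) 0 ((hs.drop start.toNat).length : Int) le_rfl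
    (by positivity) (by exact_mod_cast hlen) le_rfl]
  simp only [PySem.List.pyGetD_natCast, pre_getD _ 0 _ hlen]
  rw [canSlice_closed H m start hs mx hstart]
  have htake : (hs.drop start.toNat).take ((hs.drop start.toNat).takeWhile (pA m)).length
      = (hs.drop start.toNat).takeWhile (pA m) :=
    (List.prefix_iff_eq_take.mp (List.takeWhile_prefix _)).symm
  rw [htake]
  norm_num

-- the two binary searches probe the same midpoints with equal predicates
lemma loop_congr (H start mx : Int) (hs : List Int) (pre rmin : List Int) (n : Int)
    (hP : ∀ m, canSliceToHeight H m start hs mx = okB H start mx pre rmin n m) :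
    ∀ (lo hi : Int), fnhLoop H start hs mx lo hi = altLoop H start mx pre rmin n lo hi := by
  intro lo hi
  fun_induction fnhLoop H start hs mx lo hi
  case case1 =>
    rename_i lo hi hlt mm hcond ih
    rw [altLoop, dif_pos hlt]
    rw [if_pos (by rw [← hP]; exact hcond)]
    exact ih
  case case2 =>
    rename_i lo hi hlt mm hcond ih
    rw [altLoop, dif_pos hlt]
    rw [if_neg (by rw [← hP]; exact hcond)]
    exact ih
  case case3 =>
    rename_i lo hi hge
    rw [altLoop, dif_neg hge]

-- ===== VERDICT (by name: the statement is the Claim_ definition above) =====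
theorem findNextHighest_spec : Claim_equal_findNextHighest := by
  intro H start hs mx _hD hP
  unfold Spec_findNextHighest findNextHighest findNextHighest_alt
  have hstart : 0 ≤ start := hP
  rw [PySem.List.slice_from hs hstart]
  exact loop_congr H start mx hs _ _ _
    (fun m => (okB_eq_canSlice H start mx hs m hstart).symm) 0 H
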